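-- pv_equiv track=rewrite | github.com/rickvanderwolk/led-matrix | modes/clock/main.py | digit_cells
-- ===== SOURCE A (Python) =====
-- glyph={
--     0:[0xF,0x9,0x9,0xF],
--     1:[0x6,0x2,0x2,0x7],
--     2:[0xF,0x1,0xF,0x8],
--     3:[0xF,0x1,0xF,0x1],
--     4:[0x9,0x9,0xF,0x1],
--     5:[0xF,0x8,0xF,0x1],
--     6:[0xF,0x8,0xF,0x9],
--     7:[0xF,0x1,0x2,0x2],
--     8:[0xF,0x9,0xF,0x9],
--     9:[0xF,0x9,0xF,0x1]
-- }
--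
-- def digit_cells(d,x0,y0):
--     s=set()
--     rows=glyph[int(d)]
--     for r in range(4):
--         row=rows[r]
--         for cx in range(4):
--             if (row>>(3-cx))&1:
--                 s.add((x0+cx,y0+r))
--     return s
-- ===== SOURCE B (Python) =====
-- # B: each digit glyph stored as an explicit list of lit (cx, r) cells; digit_cells is
-- # a single comprehension over that list -- no 4x4 scan, no bit shifts.
-- GLYPH_COORDS = {
--     0: [(0, 0), (1, 0), (2, 0), (3, 0), (0, 1), (3, 1), (0, 2), (3, 2), (0, 3), (1, 3), (2, 3), (3, 3)],
--     1: [(1, 0), (2, 0), (2, 1), (2, 2), (1, 3), (2, 3), (3, 3)],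
--     2: [(0, 0), (1, 0), (2, 0), (3, 0), (3, 1), (0, 2), (1, 2), (2, 2), (3, 2), (0, 3)],
--     3: [(0, 0), (1, 0), (2, 0), (3, 0), (3, 1), (0, 2), (1, 2), (2, 2), (3, 2), (3, 3)],
--     4: [(0, 0), (3, 0), (0, 1), (3, 1), (0, 2), (1, 2), (2, 2), (3, 2), (3, 3)],
--     5: [(0, 0), (1, 0), (2, 0), (3, 0), (0, 1), (0, 2), (1, 2), (2, 2), (3, 2), (3, 3)],
--     6: [(0, 0), (1, 0), (2, 0), (3, 0), (0, 1), (0, 2), (1, 2), (2, 2), (3, 2), (0, 3), (3, 3)],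
--     7: [(0, 0), (1, 0), (2, 0), (3, 0), (3, 1), (2, 2), (2, 3)],
--     8: [(0, 0), (1, 0), (2, 0), (3, 0), (0, 1), (3, 1), (0, 2), (1, 2), (2, 2), (3, 2), (0, 3), (3, 3)],
--     9: [(0, 0), (1, 0), (2, 0), (3, 0), (0, 1), (3, 1), (0, 2), (1, 2), (2, 2), (3, 2), (3, 3)],
-- }
--
-- def digit_cells(d, x0, y0):
--     return {(x0 + cx, y0 + r) for cx, r in GLYPH_COORDS[int(d)]}
-- ===== Notes on version B (the rewrite author's own statement) =====
-- stated objective: simpler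
-- what changed: Each digit glyph is stored as an explicit list of lit (cx, r) cell coordinates and digit_cells becomes a single comprehension translating that list, removing the 4x4 row/column scan and the bit-shift/mask decoding entirely.
import Mathlib
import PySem

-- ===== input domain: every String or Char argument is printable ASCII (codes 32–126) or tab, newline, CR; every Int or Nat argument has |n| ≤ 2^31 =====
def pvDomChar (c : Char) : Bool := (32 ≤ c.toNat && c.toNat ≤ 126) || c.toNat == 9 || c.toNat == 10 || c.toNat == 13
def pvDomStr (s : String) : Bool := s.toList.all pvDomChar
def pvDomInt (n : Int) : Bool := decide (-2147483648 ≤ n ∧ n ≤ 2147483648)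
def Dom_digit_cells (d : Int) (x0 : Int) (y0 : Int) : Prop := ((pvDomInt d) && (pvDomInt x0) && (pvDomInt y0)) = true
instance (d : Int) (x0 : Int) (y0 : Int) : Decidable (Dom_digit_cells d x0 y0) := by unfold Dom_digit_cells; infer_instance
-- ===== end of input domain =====

-- B stores each digit glyph as an explicit list of lit (cx, r) cells and maps one translation
-- over that list, instead of A's 4x4 bitmask scan with shift/mask tests (objective: simpler).

-- ===== PORT A =====
def glyphA : PySem.Dict Int (List Int) := PySem.Dict.ofList
  [(0, [0xF, 0x9, 0x9, 0xF]), (1, [0x6, 0x2, 0x2, 0x7]), (2, [0xF, 0x1, 0xF, 0x8]),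
   (3, [0xF, 0x1, 0xF, 0x1]), (4, [0x9, 0x9, 0xF, 0x1]), (5, [0xF, 0x8, 0xF, 0x1]),
   (6, [0xF, 0x8, 0xF, 0x9]), (7, [0xF, 0x1, 0x2, 0x2]), (8, [0xF, 0x9, 0xF, 0x9]),
   (9, [0xF, 0x9, 0xF, 0x1])]

-- glyph[int(d)] raises KeyError outside Pre_digit_cells; getD with dummy default is exact under Pre_
def digit_cells (d : Int) (x0 : Int) (y0 : Int) : List (Int × Int) :=
  let rows := glyphA.getD d []
  (PySem.List.pyRange 0 4 1).foldl (fun s r =>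
    let row := PySem.List.pyGetD rows r 0
    (PySem.List.pyRange 0 4 1).foldl (fun s cx =>
      if PySem.Int.band (row >>> (3 - cx).toNat) 1 ≠ 0 then
        PySem.Set.add s (x0 + cx, y0 + r)
      else s) s) PySem.Set.empty

-- ===== PORT B =====
def glyphCoords : PySem.Dict Int (List (Int × Int)) := PySem.Dict.ofList
  [(0, [(0, 0), (1, 0), (2, 0), (3, 0), (0, 1), (3, 1), (0, 2), (3, 2), (0, 3), (1, 3), (2, 3), (3, 3)]),
   (1, [(1, 0), (2, 0), (2, 1), (2, 2), (1, 3), (2, 3), (3, 3)]),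
   (2, [(0, 0), (1, 0), (2, 0), (3, 0), (3, 1), (0, 2), (1, 2), (2, 2), (3, 2), (0, 3)]),
   (3, [(0, 0), (1, 0), (2, 0), (3, 0), (3, 1), (0, 2), (1, 2), (2, 2), (3, 2), (3, 3)]),
   (4, [(0, 0), (3, 0), (0, 1), (3, 1), (0, 2), (1, 2), (2, 2), (3, 2), (3, 3)]),
   (5, [(0, 0), (1, 0), (2, 0), (3, 0), (0, 1), (0, 2), (1, 2), (2, 2), (3, 2), (3, 3)]),
   (6, [(0, 0), (1, 0), (2, 0), (3, 0), (0, 1), (0, 2), (1, 2), (2, 2), (3, 2), (0, 3), (3, 3)]),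
   (7, [(0, 0), (1, 0), (2, 0), (3, 0), (3, 1), (2, 2), (2, 3)]),
   (8, [(0, 0), (1, 0), (2, 0), (3, 0), (0, 1), (3, 1), (0, 2), (1, 2), (2, 2), (3, 2), (0, 3), (3, 3)]),
   (9, [(0, 0), (1, 0), (2, 0), (3, 0), (0, 1), (3, 1), (0, 2), (1, 2), (2, 2), (3, 2), (3, 3)])]

-- GLYPH_COORDS[int(d)] raises KeyError outside Pre_digit_cells; getD with dummy default is exact under Pre_
def digit_cells_alt (d : Int) (x0 : Int) (y0 : Int) : List (Int × Int) :=
  PySem.Set.ofList ((glyphCoords.getD d []).map (fun p => (x0 + p.1, y0 + p.2)))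

-- ===== PRECONDITION & SPEC =====
-- Pre_ excludes d outside 0..9, on which both A and B raise KeyError on the glyph-table lookup.
def Pre_digit_cells (d : Int) (x0 : Int) (y0 : Int) : Prop := 0 ≤ d ∧ d ≤ 9
instance (d : Int) (x0 : Int) (y0 : Int) : Decidable (Pre_digit_cells d x0 y0) := by
  unfold Pre_digit_cells; infer_instance
def pvWitness_digit_cells : Int × Int × Int := (2, 0, 0)

def Spec_digit_cells (d : Int) (x0 : Int) (y0 : Int) (out : List (Int × Int)) : Prop := out = digit_cells_alt d x0 y0
instance (d : Int) (x0 : Int) (y0 : Int) (out : List (Int × Int)) : Decidable (Spec_digit_cells d x0 y0 out) := by unfold Spec_digit_cells; infer_instance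

-- ===== CLAIM (what is proved, stated in full; the proofs are below) =====
def Claim_equal_digit_cells : Prop := ∀ (d : Int) (x0 : Int) (y0 : Int), Dom_digit_cells d x0 y0 → Pre_digit_cells d x0 y0 → Spec_digit_cells d x0 y0 (digit_cells d x0 y0)

-- ===== LEMMAS AND PROOFS =====

-- Set.add commutes with mapping an injective function over the set
theorem pv_add_map {α β : Type} [BEq α] [LawfulBEq α] [BEq β] [LawfulBEq β] (f : α → β)
    (hf : Function.Injective f) (s : List α) (x : α) :
    PySem.Set.add (s.map f) (f x) = (PySem.Set.add s x).map f := by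
  by_cases h : x ∈ s <;>
    simp [List.mem_map_of_injective hf, h]

-- Set.ofList commutes with mapping an injective function
theorem pv_ofList_map {α β : Type} [BEq α] [LawfulBEq α] [BEq β] [LawfulBEq β] (f : α → β)
    (hf : Function.Injective f) (l : List α) :
    PySem.Set.ofList (l.map f) = (PySem.Set.ofList l).map f := by
  induction l using List.reverseRecOn with
  | nil => rfl
  | append_singleton xs x ih =>
      rw [List.map_append, List.map_singleton, PySem.Set.ofList_append_singleton,
        PySem.Set.ofList_append_singleton, ih, pv_add_map f hf]

-- the translation (cx, r) ↦ (x0 + cx, y0 + r) is injective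
theorem pv_tr_inj (x0 y0 : Int) : Function.Injective (fun p : Int × Int => (x0 + p.1, y0 + p.2)) := by
  intro a b h
  simp only [Prod.mk.injEq] at h
  ext <;> omega

-- A's inner column loop at offset (x0, y0) is the translated image of the loop at offset (0, 0)
theorem pv_inner_map (x0 y0 row r : Int) (l : List Int) (s : List (Int × Int)) :
    l.foldl (fun s cx =>
      if PySem.Int.band (row >>> (3 - cx).toNat) 1 ≠ 0 then
        PySem.Set.add s (x0 + cx, y0 + r) else s) (s.map (fun p => (x0 + p.1, y0 + p.2)))
    = (l.foldl (fun s cx =>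
      if PySem.Int.band (row >>> (3 - cx).toNat) 1 ≠ 0 then
        PySem.Set.add s (0 + cx, 0 + r) else s) s).map (fun p => (x0 + p.1, y0 + p.2)) := by
  induction l generalizing s with
  | nil => rfl
  | cons cx l ih =>
      simp only [List.foldl_cons]
      split_ifs with h
      · have h2 : PySem.Set.add (s.map (fun p : Int × Int => (x0 + p.1, y0 + p.2))) (x0 + cx, y0 + r)
            = (PySem.Set.add s (0 + cx, 0 + r)).map (fun p : Int × Int => (x0 + p.1, y0 + p.2)) := by
          simpa using pv_add_map _ (pv_tr_inj x0 y0) s (0 + cx, 0 + r)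
        rw [h2, ih]
      · exact ih s

-- port A at origin (x0, y0) is the translated image of port A at the origin (0, 0)
theorem pv_digit_cells_shift (d x0 y0 : Int) :
    digit_cells d x0 y0 = (digit_cells d 0 0).map (fun p => (x0 + p.1, y0 + p.2)) := by
  unfold digit_cells
  generalize (glyphA.getD d []) = rows
  have : ∀ (lr : List Int) (s : List (Int × Int)),
      lr.foldl (fun s r =>
        (PySem.List.pyRange 0 4 1).foldl (fun s cx =>
          if PySem.Int.band ((PySem.List.pyGetD rows r 0) >>> (3 - cx).toNat) 1 ≠ 0 then
            PySem.Set.add s (x0 + cx, y0 + r) else s) s) (s.map (fun p => (x0 + p.1, y0 + p.2)))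
      = (lr.foldl (fun s r =>
        (PySem.List.pyRange 0 4 1).foldl (fun s cx =>
          if PySem.Int.band ((PySem.List.pyGetD rows r 0) >>> (3 - cx).toNat) 1 ≠ 0 then
            PySem.Set.add s (0 + cx, 0 + r) else s) s)
        s).map (fun p => (x0 + p.1, y0 + p.2)) := by
    intro lr
    induction lr with
    | nil => intro s; rfl
    | cons r lr ih =>
        intro s
        simp only [List.foldl_cons]
        rw [pv_inner_map, ih]
  simpa using this (PySem.List.pyRange 0 4 1) []

-- port B at origin (x0, y0) is the translated image of port B at the origin (0, 0)
theorem pv_digit_cells_alt_shift (d x0 y0 : Int) :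
    digit_cells_alt d x0 y0 = (digit_cells_alt d 0 0).map (fun p => (x0 + p.1, y0 + p.2)) := by
  unfold digit_cells_alt
  rw [show (glyphCoords.getD d []).map (fun p : Int × Int => (x0 + p.1, y0 + p.2))
      = ((glyphCoords.getD d []).map (fun p : Int × Int => (0 + p.1, 0 + p.2))).map
          (fun p : Int × Int => (x0 + p.1, y0 + p.2)) by simp,
    pv_ofList_map _ (pv_tr_inj x0 y0)]

-- ===== VERDICT (by name: the statement is the Claim_ definition above) =====
theorem digit_cells_spec : Claim_equal_digit_cells := by
  intro d x0 y0 _ hpre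
  unfold Spec_digit_cells
  obtain ⟨h0, h9⟩ := hpre
  rw [pv_digit_cells_shift, pv_digit_cells_alt_shift]
  interval_cases d <;> exact congrArg _ (by decide)
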